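-- pv_equiv track=rewrite | github.com/PossumXI/Immaculate | training/q/run_q_training_session.py | canonicalize_env
-- ===== SOURCE A (Python) =====
-- CANONICAL_ENV_ALIASES: dict[str, tuple[str, ...]] = {
--     "HF_TOKEN": ("HF_TOKEN", "HUGGINGFACE_TOKEN", "HUGGINFACE_ACCESS_TOKEN"),
--     "WANDB_API_KEY": ("WANDB_API_KEY", "IMMACULATE_WANDB_API_KEY"),
--     "WANDB_ENTITY": ("WANDB_ENTITY", "IMMACULATE_WANDB_ENTITY"),
--     "WANDB_PROJECT": ("WANDB_PROJECT", "IMMACULATE_WANDB_PROJECT"),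
--     "WANDB_MODE": ("WANDB_MODE", "IMMACULATE_WANDB_MODE"),
--     "OCI_CLI_AUTH": ("OCI_CLI_AUTH",),
--     "OCI_CLI_CONFIG_FILE": ("OCI_CLI_CONFIG_FILE", "OCI_CONFIG_FILE"),
--     "OCI_CLI_PROFILE": ("OCI_CLI_PROFILE", "OCI_PROFILE"),
--     "OCI_CLI_USER": ("OCI_CLI_USER", "OCI_USER"),
--     "OCI_CLI_TENANCY": ("OCI_CLI_TENANCY", "OCI_TENANCY"),
--     "OCI_CLI_FINGERPRINT": ("OCI_CLI_FINGERPRINT", "OCI_FINGERPRINT"),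
--     "OCI_CLI_REGION": ("OCI_CLI_REGION", "OCI_REGION"),
--     "OCI_CLI_KEY_FILE": ("OCI_CLI_KEY_FILE", "OCI_KEY_FILE"),
-- }
--
-- def first_present_env_value(env_map: dict[str, str], aliases: tuple[str, ...]) -> tuple[str | None, str | None]:
--     for alias in aliases:
--         value = str(env_map.get(alias, "")).strip()
--         if value:
--             return alias, value
--     return None, None
--
-- def canonicalize_env(env_map: dict[str, str]) -> tuple[dict[str, str], dict[str, str]]:
--     canonical_env = dict(env_map)
--     sources: dict[str, str] = {}
--     for canonical_name, aliases in CANONICAL_ENV_ALIASES.items():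
--         source_name, value = first_present_env_value(env_map, aliases)
--         if source_name and value:
--             canonical_env[canonical_name] = value
--             sources[canonical_name] = source_name
--     return canonical_env, sources
-- ===== SOURCE B (Python) =====
-- CANONICAL_ENV_ALIASES: dict[str, tuple[str, ...]] = {
--     "HF_TOKEN": ("HF_TOKEN", "HUGGINGFACE_TOKEN", "HUGGINFACE_ACCESS_TOKEN"),
--     "WANDB_API_KEY": ("WANDB_API_KEY", "IMMACULATE_WANDB_API_KEY"),
--     "WANDB_ENTITY": ("WANDB_ENTITY", "IMMACULATE_WANDB_ENTITY"),
--     "WANDB_PROJECT": ("WANDB_PROJECT", "IMMACULATE_WANDB_PROJECT"),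
--     "WANDB_MODE": ("WANDB_MODE", "IMMACULATE_WANDB_MODE"),
--     "OCI_CLI_AUTH": ("OCI_CLI_AUTH",),
--     "OCI_CLI_CONFIG_FILE": ("OCI_CLI_CONFIG_FILE", "OCI_CONFIG_FILE"),
--     "OCI_CLI_PROFILE": ("OCI_CLI_PROFILE", "OCI_PROFILE"),
--     "OCI_CLI_USER": ("OCI_CLI_USER", "OCI_USER"),
--     "OCI_CLI_TENANCY": ("OCI_CLI_TENANCY", "OCI_TENANCY"),
--     "OCI_CLI_FINGERPRINT": ("OCI_CLI_FINGERPRINT", "OCI_FINGERPRINT"),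
--     "OCI_CLI_REGION": ("OCI_CLI_REGION", "OCI_REGION"),
--     "OCI_CLI_KEY_FILE": ("OCI_CLI_KEY_FILE", "OCI_KEY_FILE"),
-- }
--
-- # Reverse index: alias -> (canonical name, priority = position in the alias tuple).
-- REVERSE_ALIAS_INDEX: dict[str, tuple[str, int]] = {
--     alias: (canonical, i)
--     for canonical, aliases in CANONICAL_ENV_ALIASES.items()
--     for i, alias in enumerate(aliases)
-- }
--
-- def canonicalize_env(env_map: dict[str, str]) -> tuple[dict[str, str], dict[str, str]]:
--     # Single pass over env_map: for each canonical name keep the hit with the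
--     # smallest priority (earliest alias in its tuple), as (priority, source_key, value).
--     best: dict[str, tuple[int, str, str]] = {}
--     for key, value in env_map.items():
--         info = REVERSE_ALIAS_INDEX.get(key)
--         if info is None:
--             continue
--         v = str(value).strip()
--         if not v:
--             continue
--         canonical, prio = info
--         cur = best.get(canonical)
--         if cur is None or prio < cur[0]:
--             best[canonical] = (prio, key, v)
--     canonical_env = dict(env_map)
--     sources: dict[str, str] = {}
--     for canonical in CANONICAL_ENV_ALIASES:
--         hit = best.get(canonical)
--         if hit is not None:
--             _, key, v = hit
--             canonical_env[canonical] = v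
--             sources[canonical] = key
--     return canonical_env, sources
-- ===== Notes on version B (the rewrite author's own statement) =====
-- stated objective: alternative
-- what changed: Instead of probing the env dict once per alias for each canonical name, B builds a reverse alias->(canonical,priority) index once and makes a single pass over env_map keeping the minimal-priority hit per canonical name, then emits results in table order.
import Mathlib
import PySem

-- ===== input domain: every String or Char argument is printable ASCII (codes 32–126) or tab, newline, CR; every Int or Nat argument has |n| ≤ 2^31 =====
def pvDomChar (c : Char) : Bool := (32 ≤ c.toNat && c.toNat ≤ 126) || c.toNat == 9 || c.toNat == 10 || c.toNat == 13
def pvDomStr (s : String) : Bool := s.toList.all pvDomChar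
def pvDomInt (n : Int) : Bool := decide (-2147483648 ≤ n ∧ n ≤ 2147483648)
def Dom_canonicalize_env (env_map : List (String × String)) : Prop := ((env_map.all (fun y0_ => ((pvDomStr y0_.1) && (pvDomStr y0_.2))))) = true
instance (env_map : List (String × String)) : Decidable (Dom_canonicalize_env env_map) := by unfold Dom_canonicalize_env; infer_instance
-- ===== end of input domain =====

-- B replaces A's per-canonical alias probing by a reverse alias index and a single pass
-- over env_map keeping the minimal-priority hit per canonical name (objective: alternative).


-- ===== PORT A =====
-- CANONICAL_ENV_ALIASES (module constant, shared by both Pythons)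
def pvTable : List (String × List String) :=
  [("HF_TOKEN", ["HF_TOKEN", "HUGGINGFACE_TOKEN", "HUGGINFACE_ACCESS_TOKEN"]),
   ("WANDB_API_KEY", ["WANDB_API_KEY", "IMMACULATE_WANDB_API_KEY"]),
   ("WANDB_ENTITY", ["WANDB_ENTITY", "IMMACULATE_WANDB_ENTITY"]),
   ("WANDB_PROJECT", ["WANDB_PROJECT", "IMMACULATE_WANDB_PROJECT"]),
   ("WANDB_MODE", ["WANDB_MODE", "IMMACULATE_WANDB_MODE"]),
   ("OCI_CLI_AUTH", ["OCI_CLI_AUTH"]),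
   ("OCI_CLI_CONFIG_FILE", ["OCI_CLI_CONFIG_FILE", "OCI_CONFIG_FILE"]),
   ("OCI_CLI_PROFILE", ["OCI_CLI_PROFILE", "OCI_PROFILE"]),
   ("OCI_CLI_USER", ["OCI_CLI_USER", "OCI_USER"]),
   ("OCI_CLI_TENANCY", ["OCI_CLI_TENANCY", "OCI_TENANCY"]),
   ("OCI_CLI_FINGERPRINT", ["OCI_CLI_FINGERPRINT", "OCI_FINGERPRINT"]),
   ("OCI_CLI_REGION", ["OCI_CLI_REGION", "OCI_REGION"]),
   ("OCI_CLI_KEY_FILE", ["OCI_CLI_KEY_FILE", "OCI_KEY_FILE"])]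

def first_present_env_value (env_map : PySem.Dict String String) : List String → Option String × Option String
  | [] => (none, none)
  | alias_ :: rest =>
    let value := PySem.Str.strip (env_map.getD alias_ "")
    if value ≠ "" then (some alias_, some value) else first_present_env_value env_map rest

def canonicalize_env (env_map : List (String × String)) : (List (String × String)) × (List (String × String)) :=
  let env := PySem.Dict.mk env_map
  let res := pvTable.foldl
    (fun (st : PySem.Dict String String × PySem.Dict String String) entry =>
      match first_present_env_value env entry.2 with
      | (some source_name, some value) =>
        if source_name ≠ "" ∧ value ≠ "" then (st.1.insert entry.1 value, st.2.insert entry.1 source_name)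
        else st
      | _ => st)
    (PySem.Dict.mk env_map, (PySem.Dict.empty : PySem.Dict String String))
  (res.1.items, res.2.items)

-- ===== PORT B =====
-- REVERSE_ALIAS_INDEX: alias -> (canonical, priority)
def pvRev : PySem.Dict String (String × Int) :=
  pvTable.foldl
    (fun d entry => (PySem.List.enumerate entry.2).foldl (fun d p => d.insert p.2 (entry.1, p.1)) d)
    PySem.Dict.empty

def pvBestStep (b : PySem.Dict String (Int × String × String)) (kv : String × String) :
    PySem.Dict String (Int × String × String) :=
  match pvRev.get? kv.1 with
  | none => b
  | some info =>
    let v := PySem.Str.strip kv.2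
    if v = "" then b
    else
      match b.get? info.1 with
      | none => b.insert info.1 (info.2, kv.1, v)
      | some cur => if info.2 < cur.1 then b.insert info.1 (info.2, kv.1, v) else b

def canonicalize_env_alt (env_map : List (String × String)) : (List (String × String)) × (List (String × String)) :=
  let best := env_map.foldl pvBestStep PySem.Dict.empty
  let res := pvTable.foldl
    (fun (st : PySem.Dict String String × PySem.Dict String String) entry =>
      match best.get? entry.1 with
      | none => st
      | some hit => (st.1.insert entry.1 hit.2.2, st.2.insert entry.1 hit.2.1))
    (PySem.Dict.mk env_map, (PySem.Dict.empty : PySem.Dict String String))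
  (res.1.items, res.2.items)

-- ===== PRECONDITION & SPEC =====
-- The association list encodes a Python dict (A's parameter type is dict[str, str]), so its keys are
-- distinct; Pre_ states exactly that representation invariant and excludes no actual Python input.
def Pre_canonicalize_env (env_map : List (String × String)) : Prop := (env_map.map Prod.fst).Nodup
instance (env_map : List (String × String)) : Decidable (Pre_canonicalize_env env_map) := by
  unfold Pre_canonicalize_env; infer_instance

def pvWitness_canonicalize_env : (List (String × String)) :=
  [("HF_TOKEN", " tok "), ("OCI_REGION", "eu"), ("WANDB_ENTITY", "  "), ("PATH", "/bin")]

def Spec_canonicalize_env (env_map : List (String × String)) (out : (List (String × String)) × (List (String × String))) : Prop := out = canonicalize_env_alt env_map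
instance (env_map : List (String × String)) (out : (List (String × String)) × (List (String × String))) : Decidable (Spec_canonicalize_env env_map out) := by unfold Spec_canonicalize_env; infer_instance

-- ===== CLAIM (what is proved, stated in full; the proofs are below) =====
def Claim_equal_canonicalize_env : Prop := ∀ (env_map : List (String × String)), Dom_canonicalize_env env_map → Pre_canonicalize_env env_map → Spec_canonicalize_env env_map (canonicalize_env env_map)

-- ===== LEMMAS AND PROOFS =====

-- all 28 alias strings, in pvRev insertion order
def pvAliasList : List String := (pvTable.flatMap (fun e => e.2))

-- scalar mirror of pvBestStep, specialised to one canonical name with alias list `as`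
def pvSStep (as : List String) (o : Option (Int × String × String)) (kv : String × String) :
    Option (Int × String × String) :=
  match PySem.List.index? as kv.1 with
  | none => o
  | some n =>
    if PySem.Str.strip kv.2 = "" then o
    else
      match o with
      | none => some ((n : Int), kv.1, PySem.Str.strip kv.2)
      | some cur => if (n : Int) < cur.1 then some ((n : Int), kv.1, PySem.Str.strip kv.2) else o

def pvSFold (as : List String) (o : Option (Int × String × String)) (d : List (String × String)) :
    Option (Int × String × String) := d.foldl (pvSStep as) o

theorem pvRev_keys : pvRev.keys = pvAliasList := by decide

theorem pvEntry_idx (e : String × List String) (he : e ∈ pvTable) (k : String) :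
    (PySem.List.index? e.2 k).map (fun n => (n : Int)) =
      (pvRev.get? k).bind (fun q => if q.1 = e.1 then some q.2 else none) := by
  by_cases hk : k ∈ pvAliasList
  · fin_cases he <;> fin_cases hk <;> rfl
  · have hsub : ∀ e ∈ pvTable, ∀ a ∈ e.2, a ∈ pvAliasList := by decide
    have h1 : PySem.List.index? e.2 k = none :=
      (PySem.List.index?_eq_none_iff e.2 k).mpr (fun h => hk (hsub e he k h))
    have h2 : pvRev.get? k = none := by
      rw [PySem.Dict.get?_eq_none_iff_not_mem_keys, pvRev_keys]; exact hk
    rw [h1, h2]; rfl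

theorem pvSStep_nonneg (as : List String) (o : Option (Int × String × String))
    (kv : String × String) (ho : ∀ t, o = some t → 0 ≤ t.1) :
    ∀ t, pvSStep as o kv = some t → 0 ≤ t.1 := by
  intro t ht
  unfold pvSStep at ht
  split at ht
  · exact ho t ht
  next n hx =>
    split at ht
    · exact ho t ht
    · split at ht
      · injection ht with h; rw [← h]; exact Int.natCast_nonneg n
      · split at ht
        · injection ht with h; rw [← h]; exact Int.natCast_nonneg n
        · exact ho t ht

theorem pvSFold_absorb (as : List String) (d : List (String × String)) (k v : String) :
    pvSFold as (some (0, k, v)) d = some (0, k, v) := by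
  induction d with
  | nil => rfl
  | cons kv d ih =>
    have hstep : pvSStep as (some (0, k, v)) kv = some (0, k, v) := by
      unfold pvSStep
      cases h : PySem.List.index? as kv.1 with
      | none => rfl
      | some n => simp [show ¬((n : Int) < 0) by omega]
    simp only [pvSFold, List.foldl_cons, hstep]
    exact ih

-- first-match value of key a in d, stripped, nonempty (what A's alias probe sees)
def pvHit (d : List (String × String)) (a : String) : Option String :=
  if PySem.Str.strip ((PySem.Dict.mk d).getD a "") = "" then none
  else some (PySem.Str.strip ((PySem.Dict.mk d).getD a ""))

theorem pvHit_nil (a : String) : pvHit [] a = none := by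
  simp [pvHit, PySem.Dict.getD, PySem.Dict.get?, show PySem.Str.strip "" = "" from rfl]

theorem pvHit_cons_self (d : List (String × String)) (k v : String) :
    pvHit ((k, v) :: d) k =
      (if PySem.Str.strip v = "" then none else some (PySem.Str.strip v)) := by
  simp [pvHit, PySem.Dict.getD, PySem.Dict.get?_mk_cons]

theorem pvHit_cons_ne (d : List (String × String)) (k v a : String) (h : k ≠ a) :
    pvHit ((k, v) :: d) a = pvHit d a := by
  simp [pvHit, PySem.Dict.getD, PySem.Dict.get?_mk_cons, show (k == a) = false by simpa using h]

theorem pvHit_not_mem (d : List (String × String)) (a : String) (h : a ∉ d.map Prod.fst) :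
    pvHit d a = none := by
  have hget : (PySem.Dict.mk d).get? a = none := by
    rw [PySem.Dict.get?_eq_none_iff_not_mem_keys]
    simpa [PySem.Dict.keys] using h
  simp [pvHit, PySem.Dict.getD, hget, show PySem.Str.strip "" = "" from rfl]

theorem pvSFold_cons (a : String) (as : List String) (ha : a ∉ as) :
    ∀ (d : List (String × String)) (o : Option (Int × String × String)),
      (d.map Prod.fst).Nodup → (∀ t, o = some t → 0 ≤ t.1) →
      pvSFold (a :: as) (o.map (fun t => (t.1 + 1, t.2))) d =
        match pvHit d a with
        | some v => some (0, a, v)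
        | none => (pvSFold as o d).map (fun t => (t.1 + 1, t.2)) := by
  intro d
  induction d with
  | nil => intro o _ _; rw [pvHit_nil]; rfl
  | cons kv d ih =>
    intro o hnd ho
    obtain ⟨k, v⟩ := kv
    simp only [List.map_cons, List.nodup_cons] at hnd
    obtain ⟨hk0, hnd'⟩ := hnd
    simp only [pvSFold, List.foldl_cons] at ih ⊢
    by_cases hk : k = a
    · subst hk
      by_cases hv : PySem.Str.strip v = ""
      · -- empty strip: both sides skip key k entirely
        have hstepl : pvSStep (k :: as) (o.map (fun t => (t.1 + 1, t.2))) (k, v) =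
            o.map (fun t => (t.1 + 1, t.2)) := by
          unfold pvSStep
          rw [PySem.List.index?_cons_self]
          simp [hv]
        have hstepr : pvSStep as o (k, v) = o := by
          unfold pvSStep
          rw [show PySem.List.index? as k = none from
            (PySem.List.index?_eq_none_iff as k).mpr ha]
        simp only [pvHit_cons_self, if_pos hv, hstepl, hstepr]
        have hrec := ih o hnd' ho
        simp only [pvHit_not_mem d k hk0] at hrec
        exact hrec
      · -- nonempty strip: priority 0 wins and absorbs
        have hstepl : pvSStep (k :: as) (o.map (fun t => (t.1 + 1, t.2))) (k, v) =
            some (0, k, PySem.Str.strip v) := by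
          unfold pvSStep
          rw [PySem.List.index?_cons_self]
          cases ott : o with
          | none => simp [hv]
          | some t =>
            have ht : (0 : Int) ≤ t.1 := ho t ott
            simp [hv, show ((0 : Int) < t.1 + 1) from by omega]
        simp only [pvHit_cons_self, if_neg hv, hstepl]
        exact pvSFold_absorb _ _ _ _
    · have hidxl : PySem.List.index? (a :: as) k =
          Option.map (fun x => x + 1) (PySem.List.index? as k) :=
        PySem.List.index?_cons_of_ne as (fun h => hk h.symm)
      have key : pvSStep (a :: as) (o.map (fun t => (t.1 + 1, t.2))) (k, v) =
          (pvSStep as o (k, v)).map (fun t => (t.1 + 1, t.2)) := by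
        unfold pvSStep
        rw [hidxl]
        cases hidx : PySem.List.index? as k with
        | none => rfl
        | some n =>
          by_cases hv : PySem.Str.strip v = ""
          · simp [hv]
          · simp only [Option.map_some, if_neg hv]
            cases o with
            | none =>
              simp only [Option.map_none, Option.map_some, Option.some.injEq, Prod.mk.injEq]
              push_cast
              trivial
            | some t =>
              simp only [Option.map_some]
              by_cases hlt : (n : Int) < t.1
              · rw [if_pos (by push_cast; omega), if_pos hlt]
                simp only [Option.map_some, Option.some.injEq, Prod.mk.injEq]
                push_cast
                trivial
              · rw [if_neg (by push_cast; omega), if_neg hlt]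
                rfl
      have ho' : ∀ t, pvSStep as o (k, v) = some t → 0 ≤ t.1 := pvSStep_nonneg as o (k, v) ho
      simp only [pvHit_cons_ne d k v a hk, key]
      exact ih (pvSStep as o (k, v)) hnd' ho'

theorem pvBest_get (c : String) (as : List String)
    (H : ∀ k, (PySem.List.index? as k).map (fun n => (n : Int)) =
      (pvRev.get? k).bind (fun q => if q.1 = c then some q.2 else none)) :
    ∀ (d : List (String × String)) (b : PySem.Dict String (Int × String × String)),
      (d.foldl pvBestStep b).get? c = pvSFold as (b.get? c) d := by
  intro d
  induction d with
  | nil => intro b; rfl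
  | cons kv d ih =>
    intro b
    have hstep : (pvBestStep b kv).get? c = pvSStep as (b.get? c) kv := by
      unfold pvBestStep pvSStep
      cases hrev : pvRev.get? kv.1 with
      | none =>
        have hH := H kv.1
        rw [hrev] at hH
        simp only [Option.bind_none] at hH
        rw [show PySem.List.index? as kv.1 = none by
          cases hx : PySem.List.index? as kv.1 with
          | none => rfl
          | some n => rw [hx] at hH; simp at hH]
      | some q =>
        obtain ⟨c', p⟩ := q
        have hH := H kv.1
        rw [hrev] at hH
        simp only [Option.bind_some] at hH
        by_cases hc : c' = c
        · subst hc
          rw [if_pos rfl] at hH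
          cases hx : PySem.List.index? as kv.1 with
          | none => rw [hx] at hH; simp at hH
          | some n =>
            rw [hx] at hH
            simp at hH
            subst hH
            by_cases hv : PySem.Str.strip kv.2 = ""
            · simp [hv]
            · simp only [if_neg hv]
              cases hb : b.get? c' with
              | none => simp [PySem.Dict.get?_insert_self]
              | some cur =>
                by_cases hlt : (n : Int) < cur.1
                · simp [hlt, PySem.Dict.get?_insert_self]
                · simp [hlt, hb]
        · rw [if_neg hc] at hH
          rw [show PySem.List.index? as kv.1 = none by
            cases hx : PySem.List.index? as kv.1 with
            | none => rfl
            | some n => rw [hx] at hH; simp at hH]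
          by_cases hv : PySem.Str.strip kv.2 = ""
          · simp [hv]
          · simp only [if_neg hv]
            cases hb : b.get? c' with
            | none =>
              simp [PySem.Dict.get?_insert_of_ne b (p, kv.1, PySem.Str.strip kv.2)
                (fun h => hc h.symm)]
            | some cur =>
              by_cases hlt : p < cur.1
              · simp [hlt, PySem.Dict.get?_insert_of_ne b (p, kv.1, PySem.Str.strip kv.2)
                  (fun h => hc h.symm)]
              · simp [hlt]
    simp only [List.foldl_cons, pvSFold] at ih ⊢
    rw [ih (pvBestStep b kv), hstep]

theorem pvFP_mem (env : PySem.Dict String String) (as : List String) (s v : String)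
    (h : first_present_env_value env as = (some s, some v)) : s ∈ as ∧ v ≠ "" := by
  induction as with
  | nil => simp [first_present_env_value] at h
  | cons a rest ih =>
    unfold first_present_env_value at h
    by_cases hv : PySem.Str.strip (env.getD a "") = ""
    · rw [if_neg (by simpa using hv)] at h
      obtain ⟨h1, h2⟩ := ih h
      exact ⟨List.mem_cons_of_mem _ h1, h2⟩
    · rw [if_pos (by simpa using hv)] at h
      simp only [Prod.mk.injEq, Option.some.injEq] at h
      obtain ⟨rfl, rfl⟩ := h
      exact ⟨List.mem_cons_self, hv⟩

theorem pvSFold_nil_aliases (d : List (String × String)) : pvSFold [] none d = none := by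
  induction d with
  | nil => rfl
  | cons kv d ih =>
    simp only [pvSFold, List.foldl_cons] at ih ⊢
    rw [show pvSStep [] none kv = none from rfl]
    exact ih

theorem pvFP_eq_sfold (d : List (String × String)) (hnd : (d.map Prod.fst).Nodup) :
    ∀ (as : List String), as.Nodup →
      first_present_env_value (PySem.Dict.mk d) as =
        match pvSFold as none d with
        | some t => (some t.2.1, some t.2.2)
        | none => (none, none) := by
  intro as
  induction as with
  | nil => intro _; rw [pvSFold_nil_aliases]; rfl
  | cons a rest ih =>
    intro hnodup
    have ha : a ∉ rest := (List.nodup_cons.mp hnodup).1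
    have hmain := pvSFold_cons a rest ha d none hnd (by intro t h; cases h)
    simp only [Option.map_none] at hmain
    unfold first_present_env_value
    by_cases hv : PySem.Str.strip ((PySem.Dict.mk d).getD a "") = ""
    · have hhit : pvHit d a = none := by simp only [pvHit, if_pos hv]
      rw [hhit] at hmain
      rw [hmain]
      rw [if_neg (by simpa using hv), ih (List.nodup_cons.mp hnodup).2]
      cases pvSFold rest none d <;> rfl
    · have hhit : pvHit d a = some (PySem.Str.strip ((PySem.Dict.mk d).getD a "")) := by
        simp only [pvHit, if_neg hv]
      rw [hhit] at hmain
      rw [hmain, if_pos (by simpa using hv)]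

-- ===== VERDICT (by name: the statement is the Claim_ definition above) =====
theorem canonicalize_env_spec : Claim_equal_canonicalize_env := by
  intro env_map _ hpre
  unfold Spec_canonicalize_env canonicalize_env canonicalize_env_alt
  have hnodup_as : ∀ e ∈ pvTable, e.2.Nodup := by decide
  have hne : ∀ e ∈ pvTable, ∀ a ∈ e.2, a ≠ "" := by decide
  have hfold : pvTable.foldl
      (fun (st : PySem.Dict String String × PySem.Dict String String) entry =>
        match first_present_env_value (PySem.Dict.mk env_map) entry.2 with
        | (some source_name, some value) =>
          if source_name ≠ "" ∧ value ≠ "" then (st.1.insert entry.1 value, st.2.insert entry.1 source_name)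
          else st
        | _ => st)
      (PySem.Dict.mk env_map, (PySem.Dict.empty : PySem.Dict String String)) =
    pvTable.foldl
      (fun (st : PySem.Dict String String × PySem.Dict String String) entry =>
        match (env_map.foldl pvBestStep PySem.Dict.empty).get? entry.1 with
        | none => st
        | some hit => (st.1.insert entry.1 hit.2.2, st.2.insert entry.1 hit.2.1))
      (PySem.Dict.mk env_map, (PySem.Dict.empty : PySem.Dict String String)) := by
    apply PySem.List.foldl_congr_mem
    intro st e he
    have hget : (env_map.foldl pvBestStep PySem.Dict.empty).get? e.1 = pvSFold e.2 none env_map := by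
      have h := pvBest_get e.1 e.2 (fun k => pvEntry_idx e he k) env_map PySem.Dict.empty
      rwa [PySem.Dict.get?_empty] at h
    have hfp := pvFP_eq_sfold env_map hpre e.2 (hnodup_as e he)
    rw [hget]
    cases hsf : pvSFold e.2 none env_map with
    | none =>
      rw [hsf] at hfp
      simp only [hfp]
    | some t =>
      rw [hsf] at hfp
      simp only at hfp
      have hmem := pvFP_mem (PySem.Dict.mk env_map) e.2 t.2.1 t.2.2 hfp
      have hcond : t.2.1 ≠ "" ∧ t.2.2 ≠ "" := ⟨hne e he t.2.1 hmem.1, hmem.2⟩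
      simp only [hfp]
      rw [if_pos hcond]
  simp only [hfold]
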